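-- pv_equiv track=rewrite | github.com/sadegh92320/EEG_phd | export_data/export_tuev.py | _merge_consecutive_labels
-- ===== SOURCE A (Python) =====
-- def _merge_consecutive_labels(labels):
--     """
--     Merge consecutive seconds with the same label into event segments.
--
--     Returns: list of (start_sec, end_sec, label_int)
--     """
--     if len(labels) == 0:
--         return []
--
--     events = []
--     start = 0
--     current_label = labels[0]
--
--     for i in range(1, len(labels)):
--         if labels[i] != current_label:
--             events.append((start, i, int(current_label)))
--             start = i
--             current_label = labels[i]
--
--     # Last event
--     events.append((start, len(labels), int(current_label)))
--
--     return events
-- ===== SOURCE B (Python) =====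
-- def _merge_consecutive_labels(labels):
--     """
--     Merge consecutive seconds with the same label into event segments.
--
--     Returns: list of (start_sec, end_sec, label_int)
--     """
--     n = len(labels)
--     if n == 0:
--         return []
--     # pass 1: boundary positions (segment starts/ends)
--     bounds = [0] + [i for i in range(1, n) if labels[i] != labels[i - 1]] + [n]
--     # pass 2: pair up adjacent boundaries
--     return [(s, e, int(labels[s])) for s, e in zip(bounds, bounds[1:])]
-- ===== Notes on version B (the rewrite author's own statement) =====
-- stated objective: alternative
-- what changed: Replaces the single accumulator loop that tracks a start index and a remembered current label with two staged passes: first build the list of boundary indices where labels[i] != labels[i-1] (plus 0 and n), then zip adjacent boundaries into (start, end, labels[start]) segments.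
import Mathlib
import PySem

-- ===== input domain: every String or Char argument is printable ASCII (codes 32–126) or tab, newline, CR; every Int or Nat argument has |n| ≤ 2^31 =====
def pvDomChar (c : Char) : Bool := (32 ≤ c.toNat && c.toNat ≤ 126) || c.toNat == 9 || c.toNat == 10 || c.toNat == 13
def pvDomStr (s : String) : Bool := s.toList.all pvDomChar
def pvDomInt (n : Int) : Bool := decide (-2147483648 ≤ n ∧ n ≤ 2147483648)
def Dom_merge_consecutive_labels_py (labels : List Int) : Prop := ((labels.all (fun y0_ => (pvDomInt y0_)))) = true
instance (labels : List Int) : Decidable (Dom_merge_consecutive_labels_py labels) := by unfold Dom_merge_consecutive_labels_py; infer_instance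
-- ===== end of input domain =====

-- B replaces A's accumulator loop (remembered start + current-label comparison) with two
-- staged passes: collect boundary indices, then zip adjacent boundaries into segments;
-- objective: alternative decomposition.

-- ===== PORT A =====
-- literal port of A: the for-loop over range(1, len(labels)) is a foldl over pyRange
-- with state (events, start, current_label).
def merge_consecutive_labels_py (labels : List Int) : List (Int × Int × Int) :=
  if labels.length = 0 then []
  else
    let current_label := PySem.List.pyGetD labels 0 0
    let st := (PySem.List.pyRange 1 labels.length 1).foldl
      (fun (st : List (Int × Int × Int) × Int × Int) i =>
        if PySem.List.pyGetD labels i 0 ≠ st.2.2 then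
          (st.1 ++ [(st.2.1, i, st.2.2)], i, PySem.List.pyGetD labels i 0)
        else st)
      ([], 0, current_label)
    st.1 ++ [(st.2.1, (labels.length : Int), st.2.2)]

-- ===== PORT B =====
-- port of B: bounds = [0] ++ filtered range of change positions ++ [n];
-- bounds[1:] is a nonnegative-start slice, i.e. List.drop 1; zip + map builds the segments.
def merge_consecutive_labels_py_alt (labels : List Int) : List (Int × Int × Int) :=
  if labels.length = 0 then []
  else
    let n : Int := labels.length
    let bounds : List Int :=
      0 :: ((PySem.List.pyRange 1 n 1).filter
              (fun i => PySem.List.pyGetD labels i 0 != PySem.List.pyGetD labels (i - 1) 0)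
            ++ [n])
    (bounds.zip (bounds.drop 1)).map (fun p => (p.1, p.2, PySem.List.pyGetD labels p.1 0))

-- ===== PRECONDITION & SPEC =====
def Spec_merge_consecutive_labels_py (labels : List Int) (out : List (Int × Int × Int)) : Prop := out = merge_consecutive_labels_py_alt labels
instance (labels : List Int) (out : List (Int × Int × Int)) : Decidable (Spec_merge_consecutive_labels_py labels out) := by unfold Spec_merge_consecutive_labels_py; infer_instance

-- ===== CLAIM (what is proved, stated in full; the proofs are below) =====
def Claim_equal_merge_consecutive_labels_py : Prop := ∀ (labels : List Int), Dom_merge_consecutive_labels_py labels → Spec_merge_consecutive_labels_py labels (merge_consecutive_labels_py labels)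

-- ===== LEMMAS AND PROOFS =====

-- recursive characterisation of A's loop: gSpec xs i s c is the event list A still
-- produces when the remaining labels are xs (starting at index i) with open segment (s, c).
def gSpec : List Int → Int → Int → Int → List (Int × Int × Int)
  | [], i, s, c => [(s, i, c)]
  | x :: rest, i, s, c =>
      if x ≠ c then (s, i, c) :: gSpec rest (i + 1) i x
      else gSpec rest (i + 1) s c

-- change positions of the suffix xs starting at index i with previous label prev
def chs : List Int → Int → Int → List Int
  | [], _, _ => []
  | x :: rest, i, prev =>
      if x ≠ prev then i :: chs rest (i + 1) x else chs rest (i + 1) x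

-- segments generated from boundary list C with current start s (last boundary is l.length)
def pairsMap (l : List Int) (s : Int) : List Int → List (Int × Int × Int)
  | [] => [(s, (l.length : Int), PySem.List.pyGetD l s 0)]
  | c :: cs => (s, c, PySem.List.pyGetD l s 0) :: pairsMap l c cs

-- the fold over pyRange i n computes gSpec on the dropped suffix
theorem loop_eq_gSpec (l : List Int) : ∀ (k i : Nat) (ev : List (Int × Int × Int)) (s c : Int),
    i + k = l.length →
    (let st := (PySem.List.pyRange (i : Int) (l.length : Int) 1).foldl
        (fun (st : List (Int × Int × Int) × Int × Int) j =>
          if PySem.List.pyGetD l j 0 ≠ st.2.2 then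
            (st.1 ++ [(st.2.1, j, st.2.2)], j, PySem.List.pyGetD l j 0)
          else st)
        (ev, s, c)
     st.1 ++ [(st.2.1, (l.length : Int), st.2.2)]) = ev ++ gSpec (l.drop i) (i : Int) s c := by
  intro k
  induction k with
  | zero =>
    intro i ev s c h
    have hi : i = l.length := by omega
    rw [PySem.List.pyRange_one_eq_nil (by omega)]
    subst hi
    simp [gSpec, List.drop_of_length_le]
  | succ k ih =>
    intro i ev s c h
    have hlt : i < l.length := by omega
    rw [PySem.List.pyRange_one_cons (by omega)]
    have hget : PySem.List.pyGetD l (i : Int) 0 = l[i] := by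
      rw [PySem.List.pyGetD_natCast]; simp [List.getD, List.getElem?_eq_getElem hlt]
    have hdrop : l.drop i = l[i] :: l.drop (i + 1) := List.drop_eq_getElem_cons hlt
    simp only [List.foldl_cons, hget]
    by_cases hc : l[i] = c
    · rw [if_neg (by simp [hc])]
      have := ih (i + 1) ev s c (by omega)
      push_cast at this ⊢
      rw [this, hdrop, gSpec]
      simp [hc]
    · rw [if_pos (by simp [hc])]
      have := ih (i + 1) (ev ++ [(s, (i : Int), c)]) (i : Int) l[i] (by omega)
      push_cast at this ⊢
      rw [this, hdrop, gSpec]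
      simp [hc]

-- B's boundary filter over pyRange computes chs on the dropped suffix
theorem filter_eq_chs (l : List Int) : ∀ (k i : Nat), 1 ≤ i → i + k = l.length →
    (PySem.List.pyRange (i : Int) (l.length : Int) 1).filter
        (fun j => PySem.List.pyGetD l j 0 != PySem.List.pyGetD l (j - 1) 0)
      = chs (l.drop i) (i : Int) (l.getD (i - 1) 0) := by
  intro k
  induction k with
  | zero =>
    intro i _ h
    have hi : i = l.length := by omega
    rw [PySem.List.pyRange_one_eq_nil (by omega)]
    subst hi
    simp [chs, List.drop_of_length_le]
  | succ k ih =>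
    intro i h1 h
    have hlt : i < l.length := by omega
    have hget : PySem.List.pyGetD l (i : Int) 0 = l[i] := by
      rw [PySem.List.pyGetD_natCast]; simp [List.getD, List.getElem?_eq_getElem hlt]
    have hprevcast : (i : Int) - 1 = ((i - 1 : Nat) : Int) := by omega
    have hgetp : PySem.List.pyGetD l ((i : Int) - 1) 0 = l.getD (i - 1) 0 := by
      rw [hprevcast, PySem.List.pyGetD_natCast]
    have hdrop : l.drop i = l[i] :: l.drop (i + 1) := List.drop_eq_getElem_cons hlt
    rw [PySem.List.pyRange_one_cons (by omega), List.filter_cons, hdrop, chs]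
    have hgetD : l.getD i 0 = l[i] := by simp [List.getD, List.getElem?_eq_getElem hlt]
    have ihh := ih (i + 1) (by omega) (by omega)
    push_cast at ihh ⊢
    simp only [hgetD] at ihh
    by_cases hc : l[i] = l.getD (i - 1) 0
    · rw [if_neg (by simp [hget, hgetp, hc]), if_neg (by simp [hc])]
      exact ihh
    · rw [if_pos (by rw [hget, hgetp]; exact bne_iff_ne.mpr hc), if_pos hc, ihh]

-- gSpec on the suffix l.drop i equals the boundary/pairing view, provided the carried
-- label c is the label at the current start s.
theorem gSpec_eq_pairsMap (l : List Int) : ∀ (xs : List Int) (i : Nat) (s c : Int),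
    xs = l.drop i → i ≤ l.length → c = PySem.List.pyGetD l s 0 →
    gSpec xs (i : Int) s c = pairsMap l s (chs xs (i : Int) c) := by
  intro xs
  induction xs with
  | nil =>
    intro i s c hxs hi hc
    have : l.length ≤ i := by
      by_contra hlt
      rw [List.drop_eq_getElem_cons (by omega)] at hxs
      exact (List.cons_ne_nil _ _) hxs.symm
    have hi' : i = l.length := by omega
    subst hi' hc
    simp [gSpec, chs, pairsMap]
  | cons x rest ih =>
    intro i s c hxs hi hc
    have hlt : i < l.length := by
      by_contra hge
      rw [List.drop_of_length_le (by omega)] at hxs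
      exact (List.cons_ne_nil _ _) hxs
    have hdrop : l.drop i = l[i] :: l.drop (i + 1) := List.drop_eq_getElem_cons hlt
    rw [hdrop] at hxs
    obtain ⟨hx, hrest⟩ : x = l[i] ∧ rest = l.drop (i + 1) := by
      injection hxs with h1 h2; exact ⟨h1, h2⟩
    have hgeti : PySem.List.pyGetD l (i : Int) 0 = l[i] := by
      rw [PySem.List.pyGetD_natCast]; simp [List.getD, List.getElem?_eq_getElem hlt]
    by_cases hxc : x = c
    · rw [hxc, gSpec, if_neg (by simp), chs, if_neg (by simp)]
      exact ih (i + 1) s c hrest (by omega) hc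
    · rw [gSpec, if_pos (by simp [hxc]), chs, if_pos (by simp [hxc]), pairsMap]
      have hrec := ih (i + 1) (i : Int) x hrest (by omega)
        (by rw [hgeti, hx])
      push_cast at hrec
      rw [hrec, hc]

-- zip/map over the boundary list equals pairsMap
theorem zip_eq_pairsMap (l : List Int) : ∀ (C : List Int) (s : Int),
    (((s :: (C ++ [(l.length : Int)])).zip ((s :: (C ++ [(l.length : Int)])).drop 1)).map
        (fun p => (p.1, p.2, PySem.List.pyGetD l p.1 0)))
      = pairsMap l s C := by
  intro C
  induction C with
  | nil => intro s; simp [pairsMap]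
  | cons c cs ih =>
    intro s
    simp only [List.cons_append, List.drop_one, List.tail_cons, List.zip_cons_cons,
      List.map_cons, pairsMap]
    have := ih c
    simp only [List.drop_one, List.tail_cons] at this
    rw [this]

-- ===== VERDICT (by name: the statement is the Claim_ definition above) =====
theorem merge_consecutive_labels_py_spec : Claim_equal_merge_consecutive_labels_py := by
  intro labels _
  unfold Spec_merge_consecutive_labels_py merge_consecutive_labels_py merge_consecutive_labels_py_alt
  match labels with
  | [] => simp
  | x :: rest =>
    rw [if_neg (by simp), if_neg (by simp)]
    have hloop := loop_eq_gSpec (x :: rest) rest.length 1 [] 0 x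
      (by simp only [List.length_cons]; omega)
    simp only [List.length_cons, PySem.List.pyGetD_zero_cons] at hloop ⊢
    push_cast at hloop ⊢
    rw [hloop]
    simp only [List.nil_append, List.drop_one, List.tail_cons]
    have hg := gSpec_eq_pairsMap (x :: rest) ((x :: rest).drop 1) 1 0 x rfl
      (by simp) (by simp [PySem.List.pyGetD_zero_cons])
    simp only [List.drop_one, List.tail_cons] at hg
    push_cast at hg
    rw [hg]
    have hfilt := filter_eq_chs (x :: rest) rest.length 1 (by omega)
      (by simp only [List.length_cons]; omega)
    simp only [List.length_cons, List.drop_one, List.tail_cons] at hfilt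
    push_cast at hfilt
    have hgd : (x :: rest).getD 0 0 = x := by simp
    rw [hgd] at hfilt
    rw [hfilt]
    have hz := zip_eq_pairsMap (x :: rest) (chs rest 1 x) 0
    simp only [List.length_cons] at hz
    push_cast at hz
    exact hz.symm
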